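-- pv_equiv track=rewrite | github.com/Rodolfo-Rodriguez/bsale_seguimiento | app/filter_manager.py | get_date_range_from_filter
-- ===== SOURCE A (Python) =====
-- def get_date_range_from_filter(sess, fecha_field):
--
-- 	fecha_ini = ''
-- 	fecha_fin = ''
--
-- 	if 'DEAL_FILTERS' in sess and fecha_field in sess['DEAL_FILTERS']:
-- 		field_list = sess['DEAL_FILTERS'][fecha_field]
-- 		for filt in field_list:
-- 			if filt['op'] == '>=':
-- 				fecha_ini = filt['value']
-- 			elif filt['op'] == '<=':
-- 				fecha_fin = filt['value']
--
-- 	return(fecha_ini, fecha_fin)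
-- ===== SOURCE B (Python) =====
-- def get_date_range_from_filter(sess, fecha_field):
--     if 'DEAL_FILTERS' not in sess or fecha_field not in sess['DEAL_FILTERS']:
--         return ('', '')
--     field_list = sess['DEAL_FILTERS'][fecha_field]
--     fecha_ini = next((f['value'] for f in reversed(field_list) if f['op'] == '>='), '')
--     fecha_fin = next((f['value'] for f in reversed(field_list) if f['op'] == '<='), '')
--     return (fecha_ini, fecha_fin)
-- ===== Notes on version B (the rewrite author's own statement) =====
-- stated objective: alternative
-- what changed: Replaces the forward last-wins accumulator loop over the filter list by two back-to-front first-match searches (next over reversed(field_list)) that stop at the last '>='/'<=' filter directly.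
import Mathlib
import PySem

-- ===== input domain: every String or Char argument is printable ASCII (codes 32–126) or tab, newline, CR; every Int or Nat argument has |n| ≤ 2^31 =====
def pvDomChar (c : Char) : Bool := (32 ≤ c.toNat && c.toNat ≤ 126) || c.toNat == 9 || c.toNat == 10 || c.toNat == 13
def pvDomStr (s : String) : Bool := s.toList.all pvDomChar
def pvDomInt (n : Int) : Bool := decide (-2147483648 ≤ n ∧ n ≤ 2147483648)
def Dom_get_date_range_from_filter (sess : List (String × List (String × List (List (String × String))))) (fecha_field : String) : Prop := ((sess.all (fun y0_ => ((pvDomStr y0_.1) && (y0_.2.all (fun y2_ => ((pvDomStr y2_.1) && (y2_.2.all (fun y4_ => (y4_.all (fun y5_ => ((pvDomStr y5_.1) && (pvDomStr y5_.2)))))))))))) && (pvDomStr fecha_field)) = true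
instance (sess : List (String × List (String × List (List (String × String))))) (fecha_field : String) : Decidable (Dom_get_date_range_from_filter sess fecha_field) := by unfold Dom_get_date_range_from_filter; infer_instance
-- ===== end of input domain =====

-- B replaces A's forward last-wins accumulator loop by two back-to-front first-match searches (alternative decomposition, same cost).

-- ===== PORT A =====
-- A's loop body: last-wins update of (fecha_ini, fecha_fin); 'filt["op"]'/'filt["value"]'
-- are first-match assoc lookups; Pre_ guarantees the keys A dereferences are present,
-- so the getD defaults are never the returned value on admitted inputs.
def pvStepA (st : String × String) (filt : List (String × String)) : String × String :=
  if (PySem.Dict.mk filt).getD "op" "" == ">=" then ((PySem.Dict.mk filt).getD "value" st.1, st.2)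
  else if (PySem.Dict.mk filt).getD "op" "" == "<=" then (st.1, (PySem.Dict.mk filt).getD "value" st.2)
  else st

def get_date_range_from_filter (sess : List (String × List (String × List (List (String × String))))) (fecha_field : String) : String × String :=
  match (PySem.Dict.mk sess).get? "DEAL_FILTERS" with
  | none => ("", "")
  | some df =>
    match (PySem.Dict.mk df).get? fecha_field with
    | none => ("", "")
    | some field_list => field_list.foldl pvStepA ("", "")

-- ===== PORT B =====
-- next((f['value'] for f in reversed(field_list) if f['op'] == op), '')
def pvLastOp (field_list : List (List (String × String))) (op : String) : String :=
  match field_list.reverse.find? (fun f => (PySem.Dict.mk f).get? "op" == some op) with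
  | some f => ((PySem.Dict.mk f).get? "value").getD ""
  | none => ""

def get_date_range_from_filter_alt (sess : List (String × List (String × List (List (String × String))))) (fecha_field : String) : String × String :=
  match (PySem.Dict.mk sess).get? "DEAL_FILTERS" with
  | none => ("", "")
  | some df =>
    match (PySem.Dict.mk df).get? fecha_field with
    | none => ("", "")
    | some field_list => (pvLastOp field_list ">=", pvLastOp field_list "<=")

-- ===== PRECONDITION & SPEC =====
-- Pre_ excludes exactly the inputs where Python A raises KeyError: a filter dict in the
-- selected list missing the 'op' key, or missing 'value' while its 'op' is '>=' or '<='.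
def Pre_get_date_range_from_filter (sess : List (String × List (String × List (List (String × String))))) (fecha_field : String) : Prop :=
  ∀ df, (PySem.Dict.mk sess).get? "DEAL_FILTERS" = some df →
  ∀ fl, (PySem.Dict.mk df).get? fecha_field = some fl →
  ∀ filt ∈ fl, ((PySem.Dict.mk filt).get? "op").isSome = true ∧
    (((PySem.Dict.mk filt).get? "op" = some ">=" ∨ (PySem.Dict.mk filt).get? "op" = some "<=") →
      ((PySem.Dict.mk filt).get? "value").isSome = true)
instance (sess : List (String × List (String × List (List (String × String))))) (fecha_field : String) : Decidable (Pre_get_date_range_from_filter sess fecha_field) := by unfold Pre_get_date_range_from_filter; infer_instance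

def pvWitness_get_date_range_from_filter : (List (String × List (String × List (List (String × String))))) × String :=
  ([("DEAL_FILTERS", [("fecha", [[("op", ">="), ("value", "2020-01-01")], [("op", "<="), ("value", "2020-12-31")]])])], "fecha")

def Spec_get_date_range_from_filter (sess : List (String × List (String × List (List (String × String))))) (fecha_field : String) (out : String × String) : Prop := out = get_date_range_from_filter_alt sess fecha_field
instance (sess : List (String × List (String × List (List (String × String))))) (fecha_field : String) (out : String × String) : Decidable (Spec_get_date_range_from_filter sess fecha_field out) := by unfold Spec_get_date_range_from_filter; infer_instance

-- ===== CLAIM (what is proved, stated in full; the proofs are below) =====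
def Claim_equal_get_date_range_from_filter : Prop := ∀ (sess : List (String × List (String × List (List (String × String))))) (fecha_field : String), Dom_get_date_range_from_filter sess fecha_field → Pre_get_date_range_from_filter sess fecha_field → Spec_get_date_range_from_filter sess fecha_field (get_date_range_from_filter sess fecha_field)

-- ===== LEMMAS AND PROOFS =====

-- peeling one filter off the front of the back-to-front search
theorem pvLastOp_cons (filt : List (String × String)) (rest : List (List (String × String))) (op dflt : String)
    (h : (PySem.Dict.mk filt).get? "op" = some op → ((PySem.Dict.mk filt).get? "value").getD dflt = ((PySem.Dict.mk filt).get? "value").getD "") :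
    (match (filt :: rest).reverse.find? (fun f => (PySem.Dict.mk f).get? "op" == some op) with
      | some f => ((PySem.Dict.mk f).get? "value").getD ""
      | none => dflt) =
    (match rest.reverse.find? (fun f => (PySem.Dict.mk f).get? "op" == some op) with
      | some f => ((PySem.Dict.mk f).get? "value").getD ""
      | none => if (PySem.Dict.mk filt).get? "op" == some op then ((PySem.Dict.mk filt).get? "value").getD dflt else dflt) := by
  rw [List.reverse_cons, List.find?_append]
  cases hr : rest.reverse.find? (fun f => (PySem.Dict.mk f).get? "op" == some op) with
  | some f => simp
  | none =>
    simp only [List.find?_singleton]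
    by_cases hop : (PySem.Dict.mk filt).get? "op" = some op
    · simp [hop, h hop]
    · simp [beq_eq_false_iff_ne.mpr hop]

-- the forward last-wins fold computes the two back-to-front first matches
theorem pvFold_eq_last (fl : List (List (String × String))) (a b : String)
    (h : ∀ filt ∈ fl,
      (((PySem.Dict.mk filt).get? "op" = some ">=" ∨ (PySem.Dict.mk filt).get? "op" = some "<=") →
        ((PySem.Dict.mk filt).get? "value").isSome = true)) :
    fl.foldl pvStepA (a, b) =
      ((match fl.reverse.find? (fun f => (PySem.Dict.mk f).get? "op" == some ">=") with
        | some f => ((PySem.Dict.mk f).get? "value").getD ""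
        | none => a),
       (match fl.reverse.find? (fun f => (PySem.Dict.mk f).get? "op" == some "<=") with
        | some f => ((PySem.Dict.mk f).get? "value").getD ""
        | none => b)) := by
  induction fl generalizing a b with
  | nil => simp
  | cons filt rest ih =>
    have hfilt := h filt (List.mem_cons_self ..)
    have hrest : ∀ f ∈ rest, (((PySem.Dict.mk f).get? "op" = some ">=" ∨ (PySem.Dict.mk f).get? "op" = some "<=") →
        ((PySem.Dict.mk f).get? "value").isSome = true) := fun f hf => h f (List.mem_cons_of_mem _ hf)
    have hval : ∀ op, (PySem.Dict.mk filt).get? "op" = some op →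
        ((op = ">=" ∨ op = "<=") → ∀ d, ((PySem.Dict.mk filt).get? "value").getD d = ((PySem.Dict.mk filt).get? "value").getD "") := by
      intro op hop hmem d
      have := hfilt (by rcases hmem with h1 | h1 <;> subst h1 <;> [left; right] <;> exact hop)
      cases hv : (PySem.Dict.mk filt).get? "value" with
      | none => rw [hv] at this; simp at this
      | some v => simp
    rw [List.foldl_cons, ih _ _ hrest]
    rw [pvLastOp_cons filt rest ">=" a (fun hop => hval _ hop (Or.inl rfl) a),
        pvLastOp_cons filt rest "<=" b (fun hop => hval _ hop (Or.inr rfl) b)]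
    -- reduce pvStepA on filt and match the branchings
    unfold pvStepA
    have hgetD : ∀ op : String, op ≠ "" →
        (((PySem.Dict.mk filt).getD "op" "" == op) = ((PySem.Dict.mk filt).get? "op" == some op)) := by
      intro op hne
      rw [PySem.Dict.getD_eq_get?_getD]
      cases hop : (PySem.Dict.mk filt).get? "op" with
      | none => simp [Ne.symm hne]
      | some w => simp
    rw [hgetD ">=" (by decide), hgetD "<=" (by decide)]
    by_cases h1 : (PySem.Dict.mk filt).get? "op" = some ">="
    · have h2 : ¬ (PySem.Dict.mk filt).get? "op" = some "<=" := by rw [h1]; simp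
      simp only [h1]
      simp [PySem.Dict.getD_eq_get?_getD]
    · by_cases h2 : (PySem.Dict.mk filt).get? "op" = some "<="
      · simp only [h2]
        simp [PySem.Dict.getD_eq_get?_getD]
      · simp [beq_eq_false_iff_ne.mpr h1, beq_eq_false_iff_ne.mpr h2]

-- ===== VERDICT (by name: the statement is the Claim_ definition above) =====
theorem get_date_range_from_filter_spec : Claim_equal_get_date_range_from_filter := by
  intro sess fecha_field _ hpre
  unfold Spec_get_date_range_from_filter get_date_range_from_filter get_date_range_from_filter_alt
  cases hdf : (PySem.Dict.mk sess).get? "DEAL_FILTERS" with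
  | none => simp only [hdf]
  | some df =>
    cases hfl : (PySem.Dict.mk df).get? fecha_field with
    | none => simp only [hfl]
    | some fl =>
      simp only [hfl]
      have h := fun filt hf => (hpre df hdf fl hfl filt hf).2
      rw [pvFold_eq_last fl "" "" h]
      unfold pvLastOp
      rfl
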